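-- pv_equiv track=rewrite | github.com/etvan13/Spacetime-Memory-Lattice | coordinate.py | strCoord_conv
-- ===== SOURCE A (Python) =====
-- def strCoord_conv(number):
--     number %= 60 ** 6                       # ← 6-digit wrap
--     digits = []
--     while number:
--         digits.append(number % 60)
--         number //= 60
--     while len(digits) < 6:                  # ← pad to 6
--         digits.append(0)
--     return ' '.join(str(d) for d in digits)
-- ===== SOURCE B (Python) =====
-- def strCoord_conv(number):
--     number %= 60 ** 6
--     return ' '.join(str((number // 60 ** i) % 60) for i in range(6))
-- ===== Notes on version B (the rewrite author's own statement) =====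
-- stated objective: alternative
-- what changed: B replaces A's shrinking-accumulator digit loop plus a second padding loop with a single pass that extracts each of the six digits independently in closed form as (number // 60**i) % 60 for i in range(6).
import Mathlib
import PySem

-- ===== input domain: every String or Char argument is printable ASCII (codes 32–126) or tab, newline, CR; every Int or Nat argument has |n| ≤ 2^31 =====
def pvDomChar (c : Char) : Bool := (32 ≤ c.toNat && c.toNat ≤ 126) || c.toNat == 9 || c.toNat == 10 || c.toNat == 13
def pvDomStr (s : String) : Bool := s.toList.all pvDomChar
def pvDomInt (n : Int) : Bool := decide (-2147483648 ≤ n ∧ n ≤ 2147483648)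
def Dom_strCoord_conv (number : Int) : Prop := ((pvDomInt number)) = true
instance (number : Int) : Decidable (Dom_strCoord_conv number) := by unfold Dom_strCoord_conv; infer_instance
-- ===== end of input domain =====

-- B extracts each of the 6 base-60 digits independently in closed form instead of A's
-- shrinking-accumulator digit loop followed by a padding loop; alternative decomposition, same cost.

-- ===== PORT A =====
-- while number: digits.append(number % 60); number //= 60   (A calls it only with 0 ≤ number)
def strCoordDigits (n : Int) (h0 : 0 ≤ n) : List Int :=
  if hn : n ≠ 0 then
    PySem.Int.mod n 60 ::
      strCoordDigits (PySem.Int.floordiv n 60)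
        (by rw [PySem.Int.floordiv_eq_ediv_of_pos (by norm_num)]; omega)
  else []
termination_by n.toNat
decreasing_by
  rw [PySem.Int.floordiv_eq_ediv_of_pos (by norm_num)]
  omega

-- while len(digits) < 6: digits.append(0)
def strCoordPad (ds : List Int) : List Int :=
  if ds.length < 6 then strCoordPad (ds ++ [0]) else ds
termination_by 6 - ds.length
decreasing_by simp; omega

-- totality fact the port's digit loop needs: number % 60**6 is nonnegative
lemma strCoord_mod_nonneg (m : Int) : 0 ≤ PySem.Int.mod m (60 ^ 6) := by
  rw [PySem.Int.mod_eq_emod_of_pos (by norm_num)]; omega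

def strCoord_conv (number : Int) : String :=
  PySem.Str.join " "
    ((strCoordPad (strCoordDigits (PySem.Int.mod number (60 ^ 6))
        (strCoord_mod_nonneg number))).map PySem.Int.toStr)

-- ===== PORT B =====
def strCoord_conv_alt (number : Int) : String :=
  let n := PySem.Int.mod number (60 ^ 6)
  PySem.Str.join " "
    ((PySem.List.pyRange 0 6 1).map
      (fun i => PySem.Int.toStr (PySem.Int.mod (PySem.Int.floordiv n (60 ^ i.toNat)) 60)))

-- ===== PRECONDITION & SPEC =====
def Spec_strCoord_conv (number : Int) (out : String) : Prop := out = strCoord_conv_alt number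
instance (number : Int) (out : String) : Decidable (Spec_strCoord_conv number out) := by unfold Spec_strCoord_conv; infer_instance

-- ===== CLAIM (what is proved, stated in full; the proofs are below) =====
def Claim_equal_strCoord_conv : Prop := ∀ (number : Int), Dom_strCoord_conv number → Spec_strCoord_conv number (strCoord_conv number)

-- ===== LEMMAS AND PROOFS =====

-- ===== VERDICT (by name: the statement is the Claim_ definition above) =====
lemma strCoordPad_eq (ds : List Int) :
    strCoordPad ds = ds ++ List.replicate (6 - ds.length) 0 := by
  fun_induction strCoordPad ds with
  | case1 ds h ih =>
    have h6 : 6 - ds.length = (6 - (ds ++ [0]).length) + 1 := by simp; omega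
    rw [ih, h6, List.replicate_succ]; simp
  | case2 ds h =>
    have h6 : 6 - ds.length = 0 := by omega
    simp [h6]

lemma strCoordDigits_eq (k : Nat) (n : Int) (h0 : 0 ≤ n) (hlt : n < 60 ^ k) :
    strCoordDigits n h0 ++ List.replicate (k - (strCoordDigits n h0).length) 0 =
      (List.range k).map (fun i => PySem.Int.mod (PySem.Int.floordiv n (60 ^ i)) 60) := by
  induction k generalizing n with
  | zero =>
    have hz : n = 0 := by simpa using Int.lt_add_one_iff.mp (by simpa using hlt) |>.antisymm h0
    subst hz
    rw [strCoordDigits]; simp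
  | succ k ih =>
    by_cases hn : n = 0
    · subst hn
      rw [strCoordDigits]; simp only [ne_eq, not_true_eq_false, dite_false]
      have hf : (fun i : Nat => PySem.Int.mod (PySem.Int.floordiv 0 (60 ^ i)) 60)
          = fun _ => (0 : Int) := by
        funext i
        rw [PySem.Int.floordiv_eq_ediv_of_pos (pow_pos (by norm_num) i),
            PySem.Int.mod_eq_emod_of_pos (by norm_num)]
        simp
      rw [hf]
      simp [List.map_const']
    · rw [strCoordDigits]; simp only [ne_eq, hn, not_false_eq_true, dite_true]
      have hd : PySem.Int.floordiv n 60 = n / 60 :=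
        PySem.Int.floordiv_eq_ediv_of_pos (by norm_num)
      have h0' : 0 ≤ PySem.Int.floordiv n 60 := by rw [hd]; omega
      have hlt' : PySem.Int.floordiv n 60 < 60 ^ k := by
        rw [hd]
        rw [Int.ediv_lt_iff_lt_mul (by norm_num)]
        calc n < 60 ^ (k + 1) := hlt
          _ = 60 ^ k * 60 := pow_succ 60 k
      rw [List.range_succ_eq_map, List.map_cons, List.map_map, List.cons_append]
      simp only [List.length_cons, Nat.add_sub_add_right]
      congr 1
      · rw [PySem.Int.floordiv_eq_ediv_of_pos (b := 60 ^ 0) (by norm_num)]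
        simp
      · rw [ih (PySem.Int.floordiv n 60) h0' hlt']
        apply List.map_congr_left
        intro i _
        simp only [Function.comp_apply]
        rw [hd, PySem.Int.floordiv_eq_ediv_of_pos (pow_pos (by norm_num) (i + 1)),
            PySem.Int.floordiv_eq_ediv_of_pos (pow_pos (by norm_num) i),
            pow_succ' (60 : Int) i, ← Int.ediv_ediv_of_nonneg (x := n) (by norm_num : (0:Int) ≤ 60)]

theorem strCoord_conv_spec : Claim_equal_strCoord_conv := by
  intro number _
  unfold Spec_strCoord_conv strCoord_conv strCoord_conv_alt
  have h0 : 0 ≤ PySem.Int.mod number (60 ^ 6) := strCoord_mod_nonneg number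
  have hlt : PySem.Int.mod number (60 ^ 6) < 60 ^ 6 := by
    rw [PySem.Int.mod_eq_emod_of_pos (by norm_num)]
    exact Int.emod_lt_of_pos number (by norm_num)
  rw [strCoordPad_eq, strCoordDigits_eq 6 _ h0 hlt]
  congr 1
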